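-- pv_equiv track=rewrite | github.com/agairola/PlayWithPKI | hierarchy.py | _replaceNbspWithIndent
-- ===== SOURCE A (Python) =====
-- def _replaceNbspWithIndent(trust_string):
--     trust_string = trust_string.replace('|__', '|__</span>')
--     t = trust_string.split('&nbsp;&nbsp;')
--     trust_string_new = t[0]
--     i = 1
--     c = 1
--     while i <= len(t) - 1:
--         if t[i]:
--             trust_string_new += '<span style="padding-left: ' + str(c * 20) + 'px">' + t[i]
--             c = 1
--         else:
--             c += 1
--         i += 1
--     return trust_string_new
-- ===== SOURCE B (Python) =====
-- def _replaceNbspWithIndent(trust_string):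
--     s = trust_string.replace('|__', '|__</span>')
--     D = '&nbsp;&nbsp;'
--     out = []
--     i = 0
--     n = len(s)
--     while i < n:
--         if s.startswith(D, i):
--             k = 0
--             while s.startswith(D, i):
--                 k += 1
--                 i += len(D)
--             if i < n:
--                 out.append('<span style="padding-left: ' + str(k * 20) + 'px">')
--         else:
--             out.append(s[i])
--             i += 1
--     return ''.join(out)
-- ===== Notes on version B (the rewrite author's own statement) =====
-- stated objective: alternative
-- what changed: Replaces A's split-on-the-nbsp-delimiter token loop with a pending-run counter by a single left-to-right character scan that consumes each maximal delimiter run in place and emits the padding span (or nothing for a run at the end of the string) directly.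
import Mathlib
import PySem

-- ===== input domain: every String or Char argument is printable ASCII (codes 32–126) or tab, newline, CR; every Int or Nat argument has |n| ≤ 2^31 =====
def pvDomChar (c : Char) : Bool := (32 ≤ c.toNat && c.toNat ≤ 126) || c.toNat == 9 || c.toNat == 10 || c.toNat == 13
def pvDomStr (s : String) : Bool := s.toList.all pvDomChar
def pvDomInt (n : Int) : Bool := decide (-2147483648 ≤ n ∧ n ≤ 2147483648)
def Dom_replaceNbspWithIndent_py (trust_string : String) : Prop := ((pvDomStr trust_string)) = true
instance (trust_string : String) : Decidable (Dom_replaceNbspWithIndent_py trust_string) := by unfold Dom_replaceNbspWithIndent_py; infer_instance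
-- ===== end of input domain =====

-- B replaces A's split-on-'&nbsp;&nbsp;' token loop (with its pending-run counter) by one
-- character scan that consumes each maximal delimiter run in place; same result, same O(n) cost.

-- ===== PORT A =====

-- the span literal '<span style="padding-left: ' + str(c*20) + 'px">' of A
def pvSpanA (c : Int) : List Char :=
  "<span style=\"padding-left: ".toList ++ (PySem.Int.toStr (c * 20)).toList ++ "px\">".toList

-- the while loop of A: i walks the remaining tokens, acc is trust_string_new, c the counter
def pvALoop : List (List Char) → List Char → Int → List Char
  | [], acc, _ => acc
  | x :: xs, acc, c =>
    if x ≠ [] then pvALoop xs (acc ++ pvSpanA c ++ x) 1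
    else pvALoop xs acc (c + 1)

def replaceNbspWithIndent_py (trust_string : String) : String :=
  let s := PySem.Chars.replace trust_string.toList "|__".toList "|__</span>".toList
  let t := PySem.Chars.splitOn s "&nbsp;&nbsp;".toList
  match t with
  | [] => ""                       -- unreachable: split never returns an empty list
  | t0 :: rest => String.mk (pvALoop rest t0 1)

-- ===== PORT B =====

def pvDelim : List Char := "&nbsp;&nbsp;".toList

-- the span literal of B
def pvSpanB (k : Int) : List Char :=
  "<span style=\"padding-left: ".toList ++ (PySem.Int.toStr (k * 20)).toList ++ "px\">".toList

-- delimiter prefix is 12 chars long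
theorem pvDelim_prefix_len {s : List Char} (h : pvDelim.isPrefixOf s = true) :
    (List.drop pvDelim.length s).length < s.length := by
  have hp : pvDelim <+: s := by simpa using h
  have := hp.length_le
  simp [pvDelim] at this ⊢
  omega

mutual
-- B's outer while loop: copy a char, or hand a just-started delimiter run to pvBRun
def pvBGo : List Char → List Char
  | [] => []
  | c :: cs =>
    if h : pvDelim.isPrefixOf (c :: cs) then
      pvBRun 1 (List.drop pvDelim.length (c :: cs))
    else c :: pvBGo cs
  termination_by s => (s.length, 0)
  decreasing_by
    · exact Prod.Lex.left _ _ (pvDelim_prefix_len h)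
    · exact Prod.Lex.left _ _ (Nat.lt_succ_self _)

-- B's inner while loop: k delimiters consumed so far; at the end of the string emit nothing
def pvBRun (k : Int) (s : List Char) : List Char :=
  if h : pvDelim.isPrefixOf s then pvBRun (k + 1) (s.drop pvDelim.length)
  else if s = [] then [] else pvSpanB k ++ pvBGo s
  termination_by (s.length, 1)
  decreasing_by
    · exact Prod.Lex.left _ _ (pvDelim_prefix_len h)
    · exact Prod.Lex.right _ (Nat.lt_succ_self 0)
end

def replaceNbspWithIndent_py_alt (trust_string : String) : String :=
  let s := PySem.Chars.replace trust_string.toList "|__".toList "|__</span>".toList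
  String.mk (pvBGo s)

-- ===== PRECONDITION & SPEC =====
def Spec_replaceNbspWithIndent_py (trust_string : String) (out : String) : Prop := out = replaceNbspWithIndent_py_alt trust_string
instance (trust_string : String) (out : String) : Decidable (Spec_replaceNbspWithIndent_py trust_string out) := by unfold Spec_replaceNbspWithIndent_py; infer_instance

-- ===== CLAIM (what is proved, stated in full; the proofs are below) =====
def Claim_equal_replaceNbspWithIndent_py : Prop := ∀ (trust_string : String), Dom_replaceNbspWithIndent_py trust_string → Spec_replaceNbspWithIndent_py trust_string (replaceNbspWithIndent_py trust_string)

-- ===== LEMMAS AND PROOFS =====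

-- reference split: splitOn · pvDelim, in recursive form
def pvSplitD : List Char → List (List Char)
  | [] => [[]]
  | c :: rest =>
    if pvDelim.isPrefixOf (c :: rest) then
      [] :: pvSplitD (List.drop pvDelim.length (c :: rest))
    else ((c :: (pvSplitD rest).headI) :: (pvSplitD rest).tail)
termination_by s => s.length
decreasing_by
  · exact pvDelim_prefix_len (by assumption)
  · simp

theorem pvSplitD_ne_nil (s : List Char) : pvSplitD s ≠ [] := by
  cases s with
  | nil => simp [pvSplitD]
  | cons c cs => rw [pvSplitD]; split <;> simp

theorem pvSplitD_cons_head_tail (s : List Char) :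
    (pvSplitD s).headI :: (pvSplitD s).tail = pvSplitD s := by
  cases h : pvSplitD s with
  | nil => exact absurd h (pvSplitD_ne_nil s)
  | cons a l => simp

theorem pvGo_eq_splitD (f : Nat) (l cur : List Char) (acc : List (List Char))
    (hf : l.length ≤ f) :
    PySem.Chars.splitOn.go pvDelim f l cur acc
      = acc.reverse ++ (cur.reverse ++ (pvSplitD l).headI) :: (pvSplitD l).tail := by
  induction f generalizing l cur acc with
  | zero =>
    have hl : l = [] := List.length_eq_zero_iff.mp (Nat.le_zero.mp hf)
    subst hl
    simp [PySem.Chars.splitOn.go, pvSplitD]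
  | succ f ih =>
    cases l with
    | nil => simp [PySem.Chars.splitOn.go, pvSplitD]
    | cons c rest =>
      rw [PySem.Chars.splitOn.go]
      by_cases h : pvDelim.isPrefixOf (c :: rest) = true
      · have hlen : (List.drop pvDelim.length (c :: rest)).length ≤ f := by
          have hp : pvDelim <+: (c :: rest) := by simpa using h
          have h12 : pvDelim.length = 12 := rfl
          have := hp.length_le
          simp only [List.length_drop]
          omega
        rw [if_pos h, ih _ _ _ hlen]
        rw [pvSplitD, if_pos h]
        simp [pvSplitD_cons_head_tail]
      · have hlen : rest.length ≤ f := by simp at hf; omega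
        rw [if_neg h, ih _ _ _ hlen]
        rw [pvSplitD, if_neg h]
        simp

theorem pvSplitOn_eq_splitD (s : List Char) :
    PySem.Chars.splitOn s pvDelim = pvSplitD s := by
  unfold PySem.Chars.splitOn
  rw [pvGo_eq_splitD (s.length + 1) s [] [] (by omega)]
  simp [pvSplitD_cons_head_tail]

theorem pvALoop_append (xs : List (List Char)) (a b : List Char) (c : Int) :
    pvALoop xs (a ++ b) c = a ++ pvALoop xs b c := by
  induction xs generalizing a b c with
  | nil => simp [pvALoop]
  | cons x l ih =>
    by_cases hx : x = [] <;> simp [pvALoop, hx, ih, List.append_assoc]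

theorem pvSpanB_eq_spanA (k : Int) : pvSpanB k = pvSpanA k := rfl

theorem pvALoop_acc (xs : List (List Char)) (a : List Char) (c : Int) :
    pvALoop xs a c = a ++ pvALoop xs [] c := by
  have := pvALoop_append xs a [] c
  simpa using this

-- the joint invariant: bGo matches A's loop started on the split's tokens,
-- and bRun with counter k matches A's loop over the remaining tokens with counter k
theorem pvMain (n : Nat) : ∀ s : List Char, s.length ≤ n →
    (pvBGo s = (pvSplitD s).headI ++ pvALoop (pvSplitD s).tail [] 1)
    ∧ ∀ k : Int, pvBRun k s = pvALoop (pvSplitD s) [] k := by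
  induction n with
  | zero =>
    intro s hs
    have hl : s = [] := List.length_eq_zero_iff.mp (Nat.le_zero.mp hs)
    subst hl
    constructor
    · simp [pvBGo, pvSplitD, pvALoop]
    · intro k
      rw [pvBRun]
      simp [pvDelim, pvSplitD, pvALoop]
  | succ n ih =>
    intro s hs
    have hM : pvBGo s = (pvSplitD s).headI ++ pvALoop (pvSplitD s).tail [] 1 := by
      cases s with
      | nil => simp [pvBGo, pvSplitD, pvALoop]
      | cons c rest =>
        by_cases h : pvDelim.isPrefixOf (c :: rest) = true
        · have hlen : (List.drop pvDelim.length (c :: rest)).length ≤ n := by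
            have := pvDelim_prefix_len h
            simp at this hs ⊢
            omega
          rw [pvBGo, dif_pos h, (ih _ hlen).2 1]
          rw [pvSplitD, if_pos h]
          simp
        · have hlen : rest.length ≤ n := by simp at hs; omega
          rw [pvBGo, dif_neg h, (ih _ hlen).1]
          rw [pvSplitD, if_neg h]
          simp
    refine ⟨hM, ?_⟩
    intro k
    cases hcase : s with
    | nil =>
      rw [pvBRun]
      simp [pvDelim, pvSplitD, pvALoop]
    | cons c rest =>
      rw [← hcase]
      by_cases h : pvDelim.isPrefixOf s = true
      · have hlen : (List.drop pvDelim.length s).length ≤ n := by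
          have := pvDelim_prefix_len h
          simp at this hs ⊢
          omega
        rw [pvBRun, dif_pos h, (ih _ hlen).2 (k + 1)]
        rw [hcase, pvSplitD, ← hcase, if_pos (hcase ▸ h)]
        simp [pvALoop]
      · have hne : s ≠ [] := by rw [hcase]; simp
        rw [pvBRun, dif_neg h, if_neg hne, hM]
        rw [hcase, pvSplitD, ← hcase, if_neg (hcase ▸ h)]
        simp only [List.headI_cons, List.tail_cons]
        rw [pvALoop, if_pos (show (c :: (pvSplitD rest).headI) ≠ [] by simp)]
        rw [pvALoop_acc]
        simp only [pvSpanB_eq_spanA]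
        rw [pvALoop_acc _ ([] ++ pvSpanA k ++ c :: (pvSplitD rest).headI)]
        simp

-- ===== VERDICT (by name: the statement is the Claim_ definition above) =====
theorem replaceNbspWithIndent_py_spec : Claim_equal_replaceNbspWithIndent_py := by
  intro ts _
  simp only [Spec_replaceNbspWithIndent_py, replaceNbspWithIndent_py, replaceNbspWithIndent_py_alt]
  rw [show ("&nbsp;&nbsp;".toList) = pvDelim from rfl, pvSplitOn_eq_splitD]
  have hM := (pvMain (PySem.Chars.replace ts.toList "|__".toList "|__</span>".toList).length
      (PySem.Chars.replace ts.toList "|__".toList "|__</span>".toList) le_rfl).1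
  cases hsp : pvSplitD (PySem.Chars.replace ts.toList "|__".toList "|__</span>".toList) with
  | nil => exact absurd hsp (pvSplitD_ne_nil _)
  | cons t0 rest =>
    rw [hsp] at hM
    simp only [List.headI_cons, List.tail_cons] at hM
    simp only
    rw [hM, pvALoop_acc]
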